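-- pv_equiv track=rewrite | github.com/ALittlePenguin0/Recherche-d-emploi | python/compression de données/bzip2.py | invRLE
-- ===== SOURCE A (Python) =====
-- def invRLE(A,y): #fonction inverse de run-length encoding
--     x = ''
--     cpt = ''
--
--     for i in range (0,len(y)): #si l'élément est un chiffre alors cpt prend le chiffre en tant que caractère
--         if (y[i].isnumeric()) :
--             cpt = cpt + str(y[i])
--         else :
--             if cpt == '' : #si cpt est vide c'est-à-dire que la lettre n'a pas de répétition alors on ajoute la lettre à x
--                 x = x + y[i]
--             else : #si le cpt est non-vide alors on ajoute à x : (la lettre fois cpt)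
--                 x = x + (int(cpt) * y[i])
--                 cpt = ''
--
--     x = list(x)
--     for i in range(0,len(x)) : # on cherche à transformer les lettres par leurs rangs dans l'alphabet
--         for j in range(0,len(A)) :
--             if x[i] == A[j] :
--                 x[i] = int(j)
--     return x
-- ===== SOURCE B (Python) =====
-- def invRLE(A, y):
--     # Two-stage run tokenizer: first parse y into explicit (count, symbol) runs with
--     # an index scan, then expand each run once, resolving the symbol's first index in
--     # A a single time per run (not per emitted character).
--     runs = []
--     i, n = 0, len(y)
--     while i < n:
--         j = i
--         while j < n and y[j].isnumeric():
--             j += 1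
--         if j == n:
--             break  # trailing digits with no symbol are dropped
--         runs.append((int(y[i:j]) if j > i else 1, y[j]))
--         i = j + 1
--     out = []
--     for cnt, ch in runs:
--         try:
--             v = A.index(ch)
--         except ValueError:
--             v = ch
--         out.extend([v] * cnt)
--     return out
-- ===== Notes on version B (the rewrite author's own statement) =====
-- stated objective: faster
-- what changed: B is a two-stage tokenizer: it first parses y into an explicit list of (count, symbol) runs with an index/while scan, then expands each run once, resolving the symbol's first index in A once per run via A.index — instead of A's per-character digit state machine that builds the full decoded string and then rescans A for every decoded character.
-- outside the precondition, e.g. on invRLE(['a'], 'ab'): A returns [0, 'b'], B returns [0, 'b']; on invRLE([], '0b'): A returns [], B returns []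
import Mathlib
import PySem

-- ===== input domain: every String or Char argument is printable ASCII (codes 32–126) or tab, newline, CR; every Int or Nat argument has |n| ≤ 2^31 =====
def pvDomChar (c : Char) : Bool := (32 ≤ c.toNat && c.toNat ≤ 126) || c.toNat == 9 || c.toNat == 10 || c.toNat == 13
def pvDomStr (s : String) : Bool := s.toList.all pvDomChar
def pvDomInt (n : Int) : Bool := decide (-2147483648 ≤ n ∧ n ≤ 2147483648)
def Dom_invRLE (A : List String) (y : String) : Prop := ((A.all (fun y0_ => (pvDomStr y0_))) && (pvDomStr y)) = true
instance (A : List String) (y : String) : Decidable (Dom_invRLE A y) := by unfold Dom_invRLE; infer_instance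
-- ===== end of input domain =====

-- B parses y into explicit (count, symbol) runs first, then expands each run once,
-- resolving the symbol's first index in A once per run instead of once per emitted
-- character (faster: the rank scan of A runs per run, not per decoded character).


-- ===== PORT A =====
-- inner loop 'for j in range(len(A)): if x[i] == A[j]: x[i] = int(j)': after the first
-- match x[i] is an int and never equals a string again, so it is the FIRST matching index.
-- If no element of A matches, Python leaves the character as a str (outside Pre_ below);
-- that untypable leftover is represented as -1 here.
def rankScan (A : List String) (j : Int) (s : String) : Int :=
  match A with
  | [] => -1
  | a :: rest => if a = s then j else rankScan rest (j + 1) s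

-- 'y[i].isnumeric()' : on the ASCII domain Dom, isnumeric coincides with '0'..'9' (isdigit)
def stepA (st : List Char × List Char) (c : Char) : List Char × List Char :=
  if PySem.Chars.isdigit c then (st.1, st.2 ++ [c])
  else if st.2 = [] then (st.1 ++ [c], [])
  else (st.1 ++ List.replicate ((PySem.Int.ofChars? st.2).getD 0).toNat c, [])

def invRLE (A : List String) (y : String) : List Int :=
  ((y.toList.foldl stepA ([], [])).1).map (fun c => rankScan A 0 (String.ofList [c]))

-- ===== PORT B =====
-- inner 'while j < n and y[j].isnumeric(): j += 1': the digit prefix and the rest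
def takeDigits (l : List Char) : List Char × List Char :=
  match l with
  | [] => ([], [])
  | c :: rest =>
    if PySem.Chars.isdigit c then
      let p := takeDigits rest; (c :: p.1, p.2)
    else ([], c :: rest)

theorem takeDigits_snd_len (l : List Char) : (takeDigits l).2.length ≤ l.length := by
  induction l with
  | nil => simp [takeDigits]
  | cons c rest ih =>
    simp only [takeDigits]
    split
    · simpa using Nat.le_succ_of_le ih
    · simp

-- outer 'while i < n' loop building runs: each step takes the digit prefix, then the
-- symbol after it ('if j == n: break' drops trailing digits with no symbol)
def runsOf (l : List Char) : List (Int × Char) :=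
  if hr : (takeDigits l).2 = [] then []
  else ((if (takeDigits l).1 = [] then 1 else (PySem.Int.ofChars? (takeDigits l).1).getD 0),
        (takeDigits l).2.head hr) :: runsOf (takeDigits l).2.tail
termination_by l.length
decreasing_by
  have h1 := takeDigits_snd_len l
  have h2 : (takeDigits l).2.length ≠ 0 := fun h => hr (List.eq_nil_of_length_eq_zero h)
  have h3 : (takeDigits l).2.tail.length = (takeDigits l).2.length - 1 := List.length_tail ..
  omega

-- 'out.extend([v] * cnt)' with 'v = A.index(ch)' (except → the str, outside Pre_; -1 here)
def invRLE_alt (A : List String) (y : String) : List Int :=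
  (runsOf y.toList).flatMap (fun p =>
    List.replicate p.1.toNat (((PySem.List.index? A (String.ofList [p.2])).map Int.ofNat).getD (-1)))

-- ===== PRECONDITION & SPEC =====
-- Pre_ excludes inputs where some non-digit character of y does not occur in A as a
-- single-character string: there Python A returns a list still containing that character
-- as a str (not an int), which is not a value of the declared type List Int (this also
-- excludes the corner where such a character only ever carries repetition count 0).
def Pre_invRLE (A : List String) (y : String) : Prop :=
  (y.toList.all (fun c => PySem.Chars.isdigit c || (A.map String.toList).contains [c])) = true
instance (A : List String) (y : String) : Decidable (Pre_invRLE A y) := by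
  unfold Pre_invRLE; infer_instance
def pvWitness_invRLE : List String × String := (["a", "b"], "3ab2b")

def Spec_invRLE (A : List String) (y : String) (out : List Int) : Prop := out = invRLE_alt A y
instance (A : List String) (y : String) (out : List Int) : Decidable (Spec_invRLE A y out) := by unfold Spec_invRLE; infer_instance

-- ===== CLAIM (what is proved, stated in full; the proofs are below) =====
def Claim_equal_invRLE : Prop := ∀ (A : List String) (y : String), Dom_invRLE A y → Pre_invRLE A y → Spec_invRLE A y (invRLE A y)

-- ===== LEMMAS AND PROOFS =====

-- A's first-match nested scan computes the same rank as B's A.index with default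
theorem rankScan_eq_index (A : List String) (j : Int) (s : String) :
    rankScan A j s = (((PySem.List.index? A s).map Int.ofNat).getD (-1 - j)) + j := by
  induction A generalizing j with
  | nil => simp [rankScan, PySem.List.index?, List.idxOf?]
  | cons a rest ih =>
    simp only [rankScan]
    by_cases h : a = s
    · subst h
      rw [PySem.List.index?_cons_self]
      simp
    · rw [if_neg h, PySem.List.index?_cons_of_ne rest h, ih (j + 1)]
      cases hi : PySem.List.index? rest s <;> simp <;> omega

def rankOf (A : List String) (c : Char) : Int :=
  ((PySem.List.index? A (String.ofList [c])).map Int.ofNat).getD (-1)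

-- A's per-character state machine, extracted from the fold
def decode (cpt l : List Char) : List Char :=
  match l with
  | [] => []
  | c :: rest =>
    if PySem.Chars.isdigit c then decode (cpt ++ [c]) rest
    else if cpt = [] then c :: decode [] rest
    else List.replicate ((PySem.Int.ofChars? cpt).getD 0).toNat c ++ decode [] rest

theorem foldl_stepA_eq_decode (l : List Char) (x cpt : List Char) :
    (l.foldl stepA (x, cpt)).1 = x ++ decode cpt l := by
  induction l generalizing x cpt with
  | nil => simp [decode]
  | cons c rest ih =>
    simp only [List.foldl_cons, stepA, decode]
    split_ifs with hd hc
    · exact ih x (cpt ++ [c])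
    · rw [ih (x ++ [c]) []]; simp
    · rw [ih _ []]; simp

theorem takeDigits_digits_append (d l : List Char) (hd : ∀ c ∈ d, PySem.Chars.isdigit c) :
    takeDigits (d ++ l) = (d ++ (takeDigits l).1, (takeDigits l).2) := by
  induction d with
  | nil => simp
  | cons c rest ih =>
    have hc := hd c (by simp)
    simp only [List.cons_append, takeDigits, hc, if_pos]
    rw [ih (fun c hc => hd c (by simp [hc]))]

-- the fused per-character decode-and-rank equals per-run expansion
theorem decode_map_eq_runs (A : List String) (l d : List Char)
    (hd : ∀ c ∈ d, PySem.Chars.isdigit c = true) :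
    (decode d l).map (rankOf A) =
      (runsOf (d ++ l)).flatMap (fun p => List.replicate p.1.toNat (rankOf A p.2)) := by
  induction l generalizing d with
  | nil =>
    unfold runsOf
    have h := takeDigits_digits_append d [] hd
    simp only [takeDigits, List.append_nil] at h
    simp [decode, h]
  | cons c rest ih =>
    by_cases hc : PySem.Chars.isdigit c = true
    · have hd' : ∀ x ∈ d ++ [c], PySem.Chars.isdigit x = true := by
        intro x hx
        rcases List.mem_append.1 hx with h | h
        · exact hd x h
        · simp at h; subst h; exact hc
      have e : d ++ c :: rest = (d ++ [c]) ++ rest := by simp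
      rw [decode, if_pos hc, e, ih (d ++ [c]) hd']
    · unfold runsOf
      rw [takeDigits_digits_append d (c :: rest) hd]
      simp only [takeDigits, hc, Bool.false_eq_true, if_false, List.append_nil]
      by_cases hdn : d = []
      · subst hdn
        rw [decode]
        simp only [hc, Bool.false_eq_true, if_false]
        simp [ih [] (by simp)]
      · rw [decode]
        simp only [hc, Bool.false_eq_true, if_false, if_neg hdn]
        simp [ih [] (by simp)]

-- ===== VERDICT (by name: the statement is the Claim_ definition above) =====
theorem invRLE_spec : Claim_equal_invRLE := by
  intro A y _ _
  unfold Spec_invRLE invRLE invRLE_alt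
  rw [foldl_stepA_eq_decode]
  have h := decode_map_eq_runs A y.toList [] (by simp)
  simp only [List.nil_append] at h ⊢
  rw [show (fun c => rankScan A 0 (String.ofList [c])) = rankOf A from ?_, h]
  · rfl
  · funext c
    rw [rankScan_eq_index]
    simp [rankOf]
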